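-- pv_equiv track=rewrite | github.com/rowdycloud/financial-disclosure | src/financial_consolidator/parsers/excel_parser.py | _detect_column_mapping
-- ===== SOURCE A (Python) =====
-- def _detect_column_mapping(
--     headers: list[str]
-- ) -> dict[str, int] | None:
--     """Detect column mapping from headers.
--
--     Args:
--         headers: List of header strings (lowercase).
--
--     Returns:
--         Mapping of field name to column index.
--     """
--     mapping: dict[str, int] = {}
--
--     for i, header in enumerate(headers):
--         if not header:
--             continue
--
--         # Date column
--         if "date" not in mapping and any(
--             kw in header for kw in ["date", "posted", "trans"]
--         ):
--             if "description" not in header: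
--                 mapping["date"] = i
--
--         # Description column
--         if "description" not in mapping and any(
--             kw in header
--             for kw in ["description", "desc", "memo", "payee", "merchant", "name"]
--         ):
--             mapping["description"] = i
--
--         # Amount column (single)
--         if "amount" not in mapping and "amount" in header:
--             mapping["amount"] = i
--
--         # Debit column
--         if "debit" not in mapping and any(
--             kw in header for kw in ["debit", "withdrawal", "payment"]
--         ):
--             mapping["debit"] = i
--
--         # Credit column
--         if "credit" not in mapping and any(
--             kw in header for kw in ["credit", "deposit"]
--         ):
--             mapping["credit"] = i
--
--         # Balance column
--         if "balance" not in mapping and any(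
--             kw in header for kw in ["balance", "bal", "running"]
--         ):
--             mapping["balance"] = i
--
--         # Category column
--         if "category" not in mapping and "category" in header:
--             mapping["category"] = i
--
--         # Check number column
--         if "check" not in mapping and "check" in header:
--             mapping["check"] = i
--
--         # Memo column (if separate from description)
--         if "memo" not in mapping and "memo" in header:
--             if mapping.get("description") != i:
--                 mapping["memo"] = i
--
--     # Validate minimum required columns
--     if "date" not in mapping or "description" not in mapping:
--         return None
--
--     if "amount" not in mapping and (
--         "debit" not in mapping or "credit" not in mapping
--     ):
--         return None
--
--     return mapping
-- ===== SOURCE B (Python) =====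
-- def _detect_column_mapping(headers):
--     """Field-major detection: one first-match scan per field; the detected
--     columns are returned as a mapping keyed in column order (left to right)."""
--
--     def first(match):
--         for i, h in enumerate(headers):
--             if h and match(i, h):
--                 return i
--         return None
--
--     def contains_any(kws):
--         return lambda i, h: any(k in h for k in kws)
--
--     desc = first(contains_any(["description", "desc", "memo", "payee", "merchant", "name"]))
--     date = first(lambda i, h: any(k in h for k in ["date", "posted", "trans"])
--                  and "description" not in h)
--     amount = first(contains_any(["amount"]))
--     debit = first(contains_any(["debit", "withdrawal", "payment"]))
--     credit = first(contains_any(["credit", "deposit"]))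
--     balance = first(contains_any(["balance", "bal", "running"]))
--     category = first(contains_any(["category"]))
--     check = first(contains_any(["check"]))
--     memo = first(lambda i, h: "memo" in h and i != desc)
--
--     if date is None or desc is None:
--         return None
--     if amount is None and (debit is None or credit is None):
--         return None
--
--     found = [("date", date), ("description", desc), ("amount", amount),
--              ("debit", debit), ("credit", credit), ("balance", balance),
--              ("category", category), ("check", check), ("memo", memo)]
--     return dict(sorted(((k, v) for k, v in found if v is not None),
--                        key=lambda kv: kv[1]))
-- ===== Notes on version B (the rewrite author's own statement) =====
-- stated objective: alternative
-- what changed: A makes one header-major pass threading a dict through nine stateful guarded inserts per header; B is field-major: one independent first-match scan per field (date filtered against 'description', memo keyed off the already-computed description index), validates, and returns the detected columns as a mapping keyed in column order.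
import Mathlib
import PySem

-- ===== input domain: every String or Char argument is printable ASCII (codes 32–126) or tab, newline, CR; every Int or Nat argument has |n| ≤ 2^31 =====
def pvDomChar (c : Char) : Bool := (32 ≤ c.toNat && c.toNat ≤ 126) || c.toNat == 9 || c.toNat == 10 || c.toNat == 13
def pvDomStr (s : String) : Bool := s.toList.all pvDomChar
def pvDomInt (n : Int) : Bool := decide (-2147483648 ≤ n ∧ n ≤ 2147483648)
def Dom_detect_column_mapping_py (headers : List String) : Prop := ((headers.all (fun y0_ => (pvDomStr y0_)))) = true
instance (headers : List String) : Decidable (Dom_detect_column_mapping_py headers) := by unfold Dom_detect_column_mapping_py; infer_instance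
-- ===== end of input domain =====

-- B re-implements the header-major stateful scan field-major: one first-match scan per field,
-- the mapping returned keyed in column order; same value on every input (alternative decomposition, similar cost).


-- ===== PORT A =====
-- any(kw in header for kw in kws)
def pvKwAny (kws : List String) (h : String) : Bool := kws.any (fun kw => PySem.Str.isIn kw h)

-- one iteration of A's `for i, header in enumerate(headers)` loop body, dict state
def pvStepA (d : PySem.Dict String Int) (p : Int × String) : PySem.Dict String Int :=
  if p.2 == "" then d else
  let d1 := if !d.contains "date" && pvKwAny ["date", "posted", "trans"] p.2 then
              (if !PySem.Str.isIn "description" p.2 then d.insert "date" p.1 else d) else d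
  let d2 := if !d1.contains "description" &&
               pvKwAny ["description", "desc", "memo", "payee", "merchant", "name"] p.2 then
              d1.insert "description" p.1 else d1
  let d3 := if !d2.contains "amount" && PySem.Str.isIn "amount" p.2 then d2.insert "amount" p.1 else d2
  let d4 := if !d3.contains "debit" && pvKwAny ["debit", "withdrawal", "payment"] p.2 then
              d3.insert "debit" p.1 else d3
  let d5 := if !d4.contains "credit" && pvKwAny ["credit", "deposit"] p.2 then
              d4.insert "credit" p.1 else d4
  let d6 := if !d5.contains "balance" && pvKwAny ["balance", "bal", "running"] p.2 then
              d5.insert "balance" p.1 else d5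
  let d7 := if !d6.contains "category" && PySem.Str.isIn "category" p.2 then
              d6.insert "category" p.1 else d6
  let d8 := if !d7.contains "check" && PySem.Str.isIn "check" p.2 then d7.insert "check" p.1 else d7
  if !d8.contains "memo" && PySem.Str.isIn "memo" p.2 then
    (if !(d8.get? "description" == some p.1) then d8.insert "memo" p.1 else d8) else d8

def detect_column_mapping_py (headers : List String) : Option (List (String × Int)) :=
  let m := (PySem.List.enumerate headers 0).foldl pvStepA PySem.Dict.empty
  if !m.contains "date" || !m.contains "description" then none
  else if !m.contains "amount" && (!m.contains "debit" || !m.contains "credit") then none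
  else some m.items

-- ===== PORT B =====
-- Source B's `first(match)`: index of the first non-empty header satisfying match, else None
def pvFirst (pred : Int → String → Bool) (i : Int) : List String → Option Int
  | [] => none
  | h :: t => if !(h == "") && pred i h then some i else pvFirst pred (i + 1) t

def detect_column_mapping_py_alt (headers : List String) : Option (List (String × Int)) :=
  let descIdx := pvFirst (fun _ h => pvKwAny ["description", "desc", "memo", "payee", "merchant", "name"] h) 0 headers
  let dateIdx := pvFirst (fun _ h => pvKwAny ["date", "posted", "trans"] h && !PySem.Str.isIn "description" h) 0 headers
  let amountIdx := pvFirst (fun _ h => PySem.Str.isIn "amount" h) 0 headers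
  let debitIdx := pvFirst (fun _ h => pvKwAny ["debit", "withdrawal", "payment"] h) 0 headers
  let creditIdx := pvFirst (fun _ h => pvKwAny ["credit", "deposit"] h) 0 headers
  let balanceIdx := pvFirst (fun _ h => pvKwAny ["balance", "bal", "running"] h) 0 headers
  let categoryIdx := pvFirst (fun _ h => PySem.Str.isIn "category" h) 0 headers
  let checkIdx := pvFirst (fun _ h => PySem.Str.isIn "check" h) 0 headers
  let memoIdx := pvFirst (fun i h => PySem.Str.isIn "memo" h && !(some i == descIdx)) 0 headers
  if dateIdx.isNone || descIdx.isNone then none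
  else if amountIdx.isNone && (debitIdx.isNone || creditIdx.isNone) then none
  else
    let found : List (String × Option Int) :=
      [("date", dateIdx), ("description", descIdx), ("amount", amountIdx), ("debit", debitIdx),
       ("credit", creditIdx), ("balance", balanceIdx), ("category", categoryIdx),
       ("check", checkIdx), ("memo", memoIdx)]
    some (PySem.List.sorted (found.filterMap (fun kv => kv.2.map (fun v => (kv.1, v))))
            (fun kv => kv.2))

-- ===== PRECONDITION & SPEC =====
def Spec_detect_column_mapping_py (headers : List String) (out : Option (List (String × Int))) : Prop := out = detect_column_mapping_py_alt headers
instance (headers : List String) (out : Option (List (String × Int))) : Decidable (Spec_detect_column_mapping_py headers out) := by unfold Spec_detect_column_mapping_py; infer_instance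

-- ===== CLAIM (what is proved, stated in full; the proofs are below) =====
def Claim_equal_detect_column_mapping_py : Prop := ∀ (headers : List String), Dom_detect_column_mapping_py headers → Spec_detect_column_mapping_py headers (detect_column_mapping_py headers)

-- ===== LEMMAS AND PROOFS =====

-- the nine per-field first-match searches of B, as named functions of the header list
def pvDesc (hs : List String) : Option Int :=
  pvFirst (fun _ h => pvKwAny ["description", "desc", "memo", "payee", "merchant", "name"] h) 0 hs
def pvDateO (hs : List String) : Option Int :=
  pvFirst (fun _ h => pvKwAny ["date", "posted", "trans"] h && !PySem.Str.isIn "description" h) 0 hs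
def pvAmountO (hs : List String) : Option Int := pvFirst (fun _ h => PySem.Str.isIn "amount" h) 0 hs
def pvDebitO (hs : List String) : Option Int := pvFirst (fun _ h => pvKwAny ["debit", "withdrawal", "payment"] h) 0 hs
def pvCreditO (hs : List String) : Option Int := pvFirst (fun _ h => pvKwAny ["credit", "deposit"] h) 0 hs
def pvBalanceO (hs : List String) : Option Int := pvFirst (fun _ h => pvKwAny ["balance", "bal", "running"] h) 0 hs
def pvCategoryO (hs : List String) : Option Int := pvFirst (fun _ h => PySem.Str.isIn "category" h) 0 hs
def pvCheckO (hs : List String) : Option Int := pvFirst (fun _ h => PySem.Str.isIn "check" h) 0 hs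
def pvMemoO (hs : List String) : Option Int :=
  pvFirst (fun i h => PySem.Str.isIn "memo" h && !(some i == pvDesc hs)) 0 hs

def pvFields (hs : List String) : List (Option Int × Int × String) :=
  [(pvDateO hs, 0, "date"), (pvDesc hs, 1, "description"), (pvAmountO hs, 2, "amount"),
   (pvDebitO hs, 3, "debit"), (pvCreditO hs, 4, "credit"), (pvBalanceO hs, 5, "balance"),
   (pvCategoryO hs, 6, "category"), (pvCheckO hs, 7, "check"), (pvMemoO hs, 8, "memo")]

-- the found fields in rule order (= the options of pvFields made concrete)
def pvRankedOf (l : List (Option Int × Int × String)) : List (Int × Int × String) :=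
  l.filterMap (fun f => f.1.map (fun j => (j, f.2.1, f.2.2)))

-- the fields found at column n, in rule order
def pvGroupOf (l : List (Option Int × Int × String)) (n : Int) : List (Int × Int × String) :=
  l.filterMap (fun f => if f.1 = some n then some (n, f.2.1, f.2.2) else none)

-- all found fields in column order (rule order within a column) = A's insertion order
def pvCanon (hs : List String) : List (Int × Int × String) :=
  (List.range hs.length).flatMap (fun (k : Nat) => pvGroupOf (pvFields hs) ((k : Nat) : Int))

def pvPairs (l : List (Int × Int × String)) : List (String × Int) := l.map (fun t => (t.2.2, t.1))

-- the rule rank of a field name (proof-side only: name ↦ its position in the rule list)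
def pvRankOf (s : String) : Int :=
  if s = "date" then 0 else if s = "description" then 1 else if s = "amount" then 2
  else if s = "debit" then 3 else if s = "credit" then 4 else if s = "balance" then 5
  else if s = "category" then 6 else if s = "check" then 7 else 8


-- ---- pvFirst basics ----
theorem pvFirst_append (p : Int → String → Bool) (i : Int) (xs ys : List String) :
    pvFirst p i (xs ++ ys) = (pvFirst p i xs).or (pvFirst p (i + xs.length) ys) := by
  induction xs generalizing i with
  | nil => simp [pvFirst]
  | cons x t ih =>
    simp only [List.cons_append, pvFirst]
    by_cases hc : (!(x == "") && p i x) = true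
    · simp [hc]
    · simp only [hc, Bool.false_eq_true, if_false]
      rw [ih]
      congr 2
      simp [List.length_cons]
      ring

theorem pvFirst_some_bound {p : Int → String → Bool} {i j : Int} {xs : List String}
    (h : pvFirst p i xs = some j) : i ≤ j ∧ j < i + xs.length := by
  induction xs generalizing i with
  | nil => simp [pvFirst] at h
  | cons x t ih =>
    simp only [pvFirst] at h
    split at h
    · cases h; constructor <;> simp [List.length_cons]
    · have := ih h
      simp [List.length_cons]
      omega

theorem pvFirst_singleton (p : Int → String → Bool) (i : Int) (h : String) :
    pvFirst p i [h] = if (!(h == "") && p i h) = true then some i else none := by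
  simp [pvFirst]

theorem pvFirst_none_iff (q : String → Bool) (i : Int) (xs : List String) :
    pvFirst (fun _ h => q h) i xs = none ↔ ∀ h ∈ xs, (!(h == "") && q h) = false := by
  induction xs generalizing i with
  | nil => simp [pvFirst]
  | cons x t ih =>
    simp only [pvFirst]
    by_cases hc : (!(x == "") && q x) = true
    · simp only [hc, if_true]
      constructor
      · intro h; cases h
      · intro hall
        have := hall x (by simp)
        rw [this] at hc; cases hc
    · simp only [hc, Bool.false_eq_true, ite_false]
      rw [ih]
      constructor
      · intro hall h hh
        rcases List.mem_cons.mp hh with rfl | hh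
        · exact Bool.eq_false_iff.mpr hc
        · exact hall h hh
      · intro hall h hh; exact hall h (by simp [hh])

theorem pvFirst_congr {p q : Int → String → Bool} (i : Int) (xs : List String)
    (hpq : ∀ j h, h ∈ xs → (!(h == "") && p j h) = (!(h == "") && q j h)) :
    pvFirst p i xs = pvFirst q i xs := by
  induction xs generalizing i with
  | nil => rfl
  | cons x t ih =>
    simp only [pvFirst]
    rw [hpq i x (by simp)]
    split
    · rfl
    · exact ih _ (fun j h hh => hpq j h (by simp [hh]))


-- ---- per-field append formulas ----
theorem pvFirst_const_append (q : String → Bool) (hs : List String) (h : String) :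
    pvFirst (fun _ x => q x) 0 (hs ++ [h])
      = (pvFirst (fun _ x => q x) 0 hs).or
          (if (!(h == "") && q h) = true then some (hs.length : Int) else none) := by
  rw [pvFirst_append]
  rw [pvFirst_singleton]
  simp

theorem pvDesc_append (hs : List String) (h : String) :
    pvDesc (hs ++ [h]) = (pvDesc hs).or
      (if (!(h == "") && pvKwAny ["description", "desc", "memo", "payee", "merchant", "name"] h) = true
       then some (hs.length : Int) else none) :=
  pvFirst_const_append _ hs h

theorem pvDateO_append (hs : List String) (h : String) :
    pvDateO (hs ++ [h]) = (pvDateO hs).or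
      (if (!(h == "") && (pvKwAny ["date", "posted", "trans"] h && !PySem.Str.isIn "description" h)) = true
       then some (hs.length : Int) else none) :=
  pvFirst_const_append _ hs h

theorem pvAmountO_append (hs : List String) (h : String) :
    pvAmountO (hs ++ [h]) = (pvAmountO hs).or
      (if (!(h == "") && PySem.Str.isIn "amount" h) = true then some (hs.length : Int) else none) :=
  pvFirst_const_append _ hs h

theorem pvDebitO_append (hs : List String) (h : String) :
    pvDebitO (hs ++ [h]) = (pvDebitO hs).or
      (if (!(h == "") && pvKwAny ["debit", "withdrawal", "payment"] h) = true then some (hs.length : Int) else none) :=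
  pvFirst_const_append _ hs h

theorem pvCreditO_append (hs : List String) (h : String) :
    pvCreditO (hs ++ [h]) = (pvCreditO hs).or
      (if (!(h == "") && pvKwAny ["credit", "deposit"] h) = true then some (hs.length : Int) else none) :=
  pvFirst_const_append _ hs h

theorem pvBalanceO_append (hs : List String) (h : String) :
    pvBalanceO (hs ++ [h]) = (pvBalanceO hs).or
      (if (!(h == "") && pvKwAny ["balance", "bal", "running"] h) = true then some (hs.length : Int) else none) :=
  pvFirst_const_append _ hs h

theorem pvCategoryO_append (hs : List String) (h : String) :
    pvCategoryO (hs ++ [h]) = (pvCategoryO hs).or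
      (if (!(h == "") && PySem.Str.isIn "category" h) = true then some (hs.length : Int) else none) :=
  pvFirst_const_append _ hs h

theorem pvCheckO_append (hs : List String) (h : String) :
    pvCheckO (hs ++ [h]) = (pvCheckO hs).or
      (if (!(h == "") && PySem.Str.isIn "check" h) = true then some (hs.length : Int) else none) :=
  pvFirst_const_append _ hs h

-- a header containing "memo" matches the description keywords, so if no header of hs
-- matched them then none contains "memo" either
theorem no_memo_of_desc_none {hs : List String} (hd : pvDesc hs = none) :
    ∀ x ∈ hs, (!(x == "") && PySem.Str.isIn "memo" x) = false := by
  intro x hx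
  have := (pvFirst_none_iff _ 0 hs).mp hd x hx
  by_cases hx0 : (x == "") = true
  · simp [hx0]
  · simp only [hx0, Bool.not_false, Bool.true_and] at this ⊢
    simp only [pvKwAny, List.any_cons, List.any_nil, Bool.or_eq_false_iff] at this
    simpa using this.2.2.1

-- memo's search is unchanged by extending the header list (its reference to the
-- description index is stable)
theorem pvMemoO_append (hs : List String) (h : String) :
    pvMemoO (hs ++ [h]) = (pvMemoO hs).or
      (if (!(h == "") && (PySem.Str.isIn "memo" h && !(some (hs.length : Int) == pvDesc (hs ++ [h])))) = true
       then some (hs.length : Int) else none) := by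
  unfold pvMemoO
  rw [pvFirst_append]
  congr 1
  · -- prefix part: the predicate only differs where "memo" occurs, which forces the
    -- description index to agree on hs and hs ++ [h]
    cases hd : pvDesc hs with
    | some m =>
      have hd' : pvDesc (hs ++ [h]) = some m := by rw [pvDesc_append, hd]; rfl
      have heq : pvDesc hs = pvDesc (hs ++ [h]) := by rw [hd, hd']
      rw [← heq, hd]
    | none =>
      apply pvFirst_congr
      intro j x hx
      have hmx := no_memo_of_desc_none hd x hx
      by_cases hx0 : (x == "") = true
      · simp [hx0]
      · simp only [hx0, Bool.not_false, Bool.true_and] at hmx ⊢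
        simp only [hmx, Bool.false_and]
  · rw [pvFirst_singleton]
    simp

-- ---- consuming the extension formulas ----
theorem or_tail_eq_some_iff (o : Option Int) (c : Bool) (n : Int)
    (hb : ∀ m, o = some m → m ≠ n) :
    (o.or (if c = true then some n else none)) = some n ↔ (!o.isSome && c) = true := by
  cases o with
  | some m =>
    have hm := hb m rfl
    simp [Option.or, hm]
  | none => cases c <;> simp [Option.or]

theorem or_tail_eq_some_lt (o : Option Int) (c : Bool) (n k : Int) (hk : k ≠ n) :
    (o.or (if c = true then some n else none)) = some k ↔ o = some k := by
  cases o with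
  | some m => simp [Option.or]
  | none =>
    cases c <;> simp [Option.or]
    exact fun hnk => absurd hnk.symm hk

-- ---- ranked list vs column groups ----
theorem filter_rankedOf (l : List (Option Int × Int × String)) (n : Int) :
    (pvRankedOf l).filter (fun t => t.1 == n) = pvGroupOf l n := by
  induction l with
  | nil => rfl
  | cons f t ih =>
    simp only [pvRankedOf, pvGroupOf, List.filterMap_cons] at *
    cases hf : f.1 with
    | none => simpa [hf] using ih
    | some j =>
      simp only [Option.map_some]
      by_cases hj : j = n
      · subst hj; simp [ih]
      · simp [hj, ih]

theorem groupOf_sublist_map (l : List (Option Int × Int × String)) (n : Int) :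
    (pvGroupOf l n).Sublist (l.map (fun f => ((n : Int), f.2.1, f.2.2))) := by
  induction l with
  | nil => simp [pvGroupOf]
  | cons f t ih =>
    simp only [pvGroupOf, List.filterMap_cons, List.map_cons]
    by_cases hc : f.1 = some n
    · simp only [hc, if_true]
      exact List.Sublist.cons₂ _ ih
    · simp only [hc, if_false]
      exact List.Sublist.cons _ ih

theorem mem_groupOf_fst {l : List (Option Int × Int × String)} {n : Int}
    {t : Int × Int × String} (ht : t ∈ pvGroupOf l n) : t.1 = n := by
  rcases List.mem_filterMap.mp ht with ⟨f, _, hf⟩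
  split at hf
  · cases hf; rfl
  · cases hf

theorem mem_groupOf_exists {l : List (Option Int × Int × String)} {n : Int}
    {t : Int × Int × String} (ht : t ∈ pvGroupOf l n) :
    ∃ f ∈ l, f.1 = some n ∧ t = (n, f.2.1, f.2.2) := by
  rcases List.mem_filterMap.mp ht with ⟨f, hfl, hf⟩
  split at hf
  · rename_i hc
    cases hf
    exact ⟨f, hfl, hc, rfl⟩
  · cases hf

-- grouping a bounded list by its first component is a permutation of the list
theorem perm_groups (l : List (Int × Int × String)) (N : Nat)
    (hb : ∀ t ∈ l, 0 ≤ t.1 ∧ t.1 < (N : Int)) :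
    ((List.range N).flatMap (fun (k : Nat) => l.filter (fun t => t.1 == ((k : Nat) : Int)))).Perm l := by
  induction N generalizing l with
  | zero =>
    have : l = [] := by
      cases l with
      | nil => rfl
      | cons a t =>
        have := hb a (by simp)
        omega
    simp [this]
  | succ N ih =>
    rw [List.range_succ, List.flatMap_append]
    simp only [List.flatMap_cons, List.flatMap_nil, List.append_nil]
    have hcong : ∀ k ∈ List.range N,
        l.filter (fun t => t.1 == ((k : Nat) : Int))
          = (l.filter (fun t => !(t.1 == (N : Int)))).filter (fun t => t.1 == ((k : Nat) : Int)) := by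
      intro k hk
      have hkN : k < N := List.mem_range.mp hk
      rw [List.filter_filter]
      apply List.filter_congr
      intro t _
      by_cases htk : t.1 = (k : Int)
      · simp only [htk]
        simp only [beq_self_eq_true, Bool.true_and]
        simp
        omega
      · simp [htk]
    have hrw : (List.range N).flatMap (fun (k : Nat) => l.filter (fun t => t.1 == ((k : Nat) : Int)))
        = (List.range N).flatMap
            (fun (k : Nat) => (l.filter (fun t => !(t.1 == (N : Int)))).filter (fun t => t.1 == ((k : Nat) : Int))) := by
      simp only [List.flatMap_def]
      exact congrArg List.flatten (List.map_congr_left hcong)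
    rw [hrw]
    have hperm := ih (l.filter (fun t => !(t.1 == (N : Int)))) (by
      intro t ht
      have hmem := List.mem_filter.mp ht
      have hb' := hb t hmem.1
      have : ¬ (t.1 = (N : Int)) := by simpa using hmem.2
      omega)
    refine (hperm.append_right _).trans ?_
    have := List.filter_append_perm (fun t => !(t.1 == (N : Int))) l
    simpa using this

theorem pairwise_flatMap_range {α : Type} (R : α → α → Prop) (g : Nat → List α) (N : Nat)
    (h1 : ∀ k, (g k).Pairwise R)
    (h2 : ∀ j k, j < k → ∀ a ∈ g j, ∀ b ∈ g k, R a b) :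
    ((List.range N).flatMap g).Pairwise R := by
  induction N with
  | zero => simp
  | succ N ih =>
    rw [List.range_succ, List.flatMap_append]
    simp only [List.flatMap_cons, List.flatMap_nil, List.append_nil]
    refine List.pairwise_append.mpr ⟨ih, h1 N, ?_⟩
    intro a ha b hb
    rcases List.mem_flatMap.mp ha with ⟨j, hj, haj⟩
    exact h2 j N (List.mem_range.mp hj) a haj b hb

-- ---- B's stable single-key sort characterised ----
-- skipping a prefix the new element is not placed before
theorem insertBy_append_not_before {α : Type} (before : α → α → Bool) (x : α) (as bs : List α)
    (h : ∀ y ∈ as, before x y = false) :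
    PySem.List.insertBy before x (as ++ bs) = as ++ PySem.List.insertBy before x bs := by
  induction as with
  | nil => rfl
  | cons a t ih =>
    have ha := h a (by simp)
    simp only [List.cons_append, PySem.List.insertBy, ha, Bool.false_eq_true, if_false]
    rw [ih (fun y hy => h y (by simp [hy]))]

-- a stable insertion sort, fed in rank order, produces the (key, rank)-lexicographic order
theorem sorted_eq_of_perm_of_lex {α : Type} (key rank : α → Int) (l c : List α)
    (hperm : c.Perm l)
    (hc : c.Pairwise (fun a b => key a < key b ∨ (key a = key b ∧ rank a < rank b)))
    (hl : l.Pairwise (fun a b => rank a < rank b)) :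
    PySem.List.sorted l key = c := by
  induction l using List.reverseRecOn generalizing c with
  | nil =>
    rw [List.perm_nil.mp hperm]
    rfl
  | append_singleton l x ih =>
    rcases List.pairwise_append.mp hl with ⟨hl', _, hrel⟩
    have hxrank : ∀ y ∈ l, rank y < rank x := fun y hy => hrel y hy x (by simp)
    have hxc : x ∈ c := hperm.mem_iff.mpr (by simp)
    rcases List.append_of_mem hxc with ⟨as, bs, rfl⟩
    have hperm' : (as ++ bs).Perm l := by
      have h1 : (x :: (as ++ bs)).Perm (x :: l) :=
        (List.perm_middle.symm.trans hperm).trans (List.perm_append_singleton x l)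
      exact h1.cons_inv
    have hc' : (as ++ bs).Pairwise (fun a b => key a < key b ∨ (key a = key b ∧ rank a < rank b)) := by
      refine List.Pairwise.sublist ?_ hc
      exact List.Sublist.append_left (List.sublist_cons_self x bs) as
    have hih := ih (as ++ bs) hperm' hc' hl'
    rw [PySem.List.sorted_eq_foldl_insertBy, List.foldl_append, ← PySem.List.sorted_eq_foldl_insertBy,
      hih, List.foldl_cons, List.foldl_nil]
    have has : ∀ y ∈ as, (decide (key x < key y)) = false := by
      intro y hy
      rcases List.pairwise_append.mp hc with ⟨_, _, hab⟩
      have := hab y hy x (by simp)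
      rcases this with hlt | ⟨heq, _⟩
      · simp; omega
      · simp [heq]
    rw [insertBy_append_not_before _ _ _ _ has]
    cases bs with
    | nil => simp [PySem.List.insertBy]
    | cons b bs' =>
      have hbx : key x < key b := by
        rcases List.pairwise_append.mp hc with ⟨_, hxb, _⟩
        have := (List.pairwise_cons.mp hxb).1 b (by simp)
        rcases this with hlt | ⟨_, hr⟩
        · exact hlt
        · have hbl : b ∈ l := hperm'.subset (by simp)
          have := hxrank b hbl
          omega
      simp [PySem.List.insertBy, hbx]

-- elements of pvFields carry their rule rank in their name
theorem rank_fields (hs : List String) :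
    ∀ f ∈ pvFields hs, pvRankOf f.2.2 = f.2.1 := by
  intro f hf
  simp only [pvFields, List.mem_cons, List.not_mem_nil, or_false] at hf
  rcases hf with rfl | rfl | rfl | rfl | rfl | rfl | rfl | rfl | rfl <;> simp [pvRankOf]

theorem rank_canon (hs : List String) :
    ∀ t ∈ pvCanon hs, pvRankOf t.2.2 = t.2.1 := by
  intro t ht
  rcases List.mem_flatMap.mp ht with ⟨k, _, hg⟩
  rcases mem_groupOf_exists hg with ⟨f, hfl, _, rfl⟩
  exact rank_fields hs f hfl

theorem rank_ranked (hs : List String) :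
    ∀ t ∈ pvRankedOf (pvFields hs), pvRankOf t.2.2 = t.2.1 := by
  intro t ht
  rcases List.mem_filterMap.mp ht with ⟨f, hfl, hf⟩
  cases hfo : f.1 with
  | none => rw [hfo] at hf; cases hf
  | some j =>
    rw [hfo] at hf
    simp only [Option.map_some, Option.some.injEq] at hf
    rw [← hf]
    exact rank_fields hs f hfl

-- the found fields, in rule order, have strictly increasing rule ranks
theorem ranked_pairwise_rank (hs : List String) :
    (pvRankedOf (pvFields hs)).Pairwise (fun a b => a.2.1 < b.2.1) := by
  have hpw : (pvFields hs).Pairwise (fun f g => f.2.1 < g.2.1) := by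
    simp [pvFields, List.pairwise_cons]
  unfold pvRankedOf
  rw [List.pairwise_filterMap]
  refine hpw.imp ?_
  intro f g hfg b hb b' hb'
  rcases Option.map_eq_some_iff.mp hb with ⟨j, _, rfl⟩
  rcases Option.map_eq_some_iff.mp hb' with ⟨j', _, rfl⟩
  simpa using hfg

theorem fields_bound (hs : List String) :
    ∀ f ∈ pvFields hs, ∀ j : Int, f.1 = some j → 0 ≤ j ∧ j < (hs.length : Int) := by
  intro f hf j hj
  simp only [pvFields, List.mem_cons, List.not_mem_nil, or_false] at hf
  have hb : ∀ (p : Int → String → Bool), pvFirst p 0 hs = some j → 0 ≤ j ∧ j < (hs.length : Int) := by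
    intro p hp
    have := pvFirst_some_bound hp
    omega
  rcases hf with rfl | rfl | rfl | rfl | rfl | rfl | rfl | rfl | rfl <;>
    simp only [pvDateO, pvDesc, pvAmountO, pvDebitO, pvCreditO, pvBalanceO, pvCategoryO,
      pvCheckO, pvMemoO] at hj <;>
    exact hb _ hj

theorem ranked_bound (hs : List String) :
    ∀ t ∈ pvRankedOf (pvFields hs), 0 ≤ t.1 ∧ t.1 < (hs.length : Int) := by
  intro t ht
  rcases List.mem_filterMap.mp ht with ⟨f, hfl, hf⟩
  cases hfo : f.1 with
  | none => rw [hfo] at hf; cases hf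
  | some j =>
    rw [hfo] at hf
    simp only [Option.map_some, Option.some.injEq] at hf
    have := fields_bound hs f hfl j hfo
    rw [← hf]
    exact this

theorem canon_eq_flatMap_filter (hs : List String) :
    pvCanon hs = (List.range hs.length).flatMap
      (fun (k : Nat) => (pvRankedOf (pvFields hs)).filter (fun t => t.1 == ((k : Nat) : Int))) := by
  unfold pvCanon
  simp only [List.flatMap_def]
  refine congrArg List.flatten (List.map_congr_left ?_)
  intro k _
  rw [filter_rankedOf]

-- the canonical column-ordered list is strictly increasing in the (column, rule-rank) key
theorem pairwise_canon (hs : List String) :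
    (pvCanon hs).Pairwise
      (fun a b => a.1 < b.1 ∨ (a.1 = b.1 ∧ a.2.1 < b.2.1)) := by
  apply pairwise_flatMap_range
  · intro k
    apply List.Pairwise.sublist (groupOf_sublist_map (pvFields hs) (k : Int))
    simp only [pvFields, List.map_cons, List.map_nil]
    simp [List.pairwise_cons]
  · intro j k hjk a ha b hb
    have h1 := mem_groupOf_fst ha
    have h2 := mem_groupOf_fst hb
    left
    rw [h1, h2]
    exact_mod_cast hjk

theorem canon_perm_ranked (hs : List String) :
    (pvCanon hs).Perm (pvRankedOf (pvFields hs)) := by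
  rw [canon_eq_flatMap_filter]
  exact perm_groups _ _ (fun t ht => ranked_bound hs t ht)

-- B's stable sort of the found pairs IS A's insertion order
theorem sorted_pairs (hs : List String) :
    PySem.List.sorted (pvPairs (pvRankedOf (pvFields hs))) (fun kv => kv.2) = pvPairs (pvCanon hs) := by
  apply sorted_eq_of_perm_of_lex (rank := fun kv => pvRankOf kv.1)
  · exact (canon_perm_ranked hs).map _
  · unfold pvPairs
    rw [List.pairwise_map]
    refine (pairwise_canon hs).imp_of_mem ?_
    intro a b ha hb hab
    have hra := rank_canon hs a ha
    have hrb := rank_canon hs b hb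
    simpa [hra, hrb] using hab
  · unfold pvPairs
    rw [List.pairwise_map]
    refine (ranked_pairwise_rank hs).imp_of_mem ?_
    intro a b ha hb hab
    have hra := rank_ranked hs a ha
    have hrb := rank_ranked hs b hb
    simpa [hra, hrb] using hab

-- ---- which field names appear in the canonical list ----
theorem mem_map_name_canon (hs : List String) (nm : String) :
    nm ∈ (pvCanon hs).map (fun t => t.2.2) ↔ ∃ f ∈ pvFields hs, f.2.2 = nm ∧ f.1.isSome = true := by
  constructor
  · intro h
    rcases List.mem_map.mp h with ⟨t, ht, rfl⟩
    rcases List.mem_flatMap.mp ht with ⟨k, _, hg⟩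
    rcases mem_groupOf_exists hg with ⟨f, hfl, hf1, rfl⟩
    exact ⟨f, hfl, rfl, by simp [hf1]⟩
  · rintro ⟨f, hfl, hnm, hsome⟩
    cases hfo : f.1 with
    | none => rw [hfo] at hsome; cases hsome
    | some j =>
      have hb := fields_bound hs f hfl j hfo
      refine List.mem_map.mpr ⟨(j, f.2.1, f.2.2), ?_, hnm⟩
      refine List.mem_flatMap.mpr ⟨j.toNat, List.mem_range.mpr (by omega), ?_⟩
      refine List.mem_filterMap.mpr ⟨f, hfl, ?_⟩
      have hcast : ((j.toNat : Nat) : Int) = j := by omega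
      rw [hcast, hfo]
      simp

theorem mem_pairs_canon (hs : List String) (nm : String) (v : Int) :
    (nm, v) ∈ pvPairs (pvCanon hs) ↔ ∃ f ∈ pvFields hs, f.2.2 = nm ∧ f.1 = some v := by
  unfold pvPairs
  constructor
  · intro h
    rcases List.mem_map.mp h with ⟨t, ht, hteq⟩
    rcases List.mem_flatMap.mp ht with ⟨k, _, hg⟩
    rcases mem_groupOf_exists hg with ⟨f, hfl, hf1, rfl⟩
    simp only [Prod.mk.injEq] at hteq
    exact ⟨f, hfl, hteq.1, by rw [hf1, hteq.2]⟩
  · rintro ⟨f, hfl, hnm, hfo⟩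
    have hb := fields_bound hs f hfl v hfo
    refine List.mem_map.mpr ⟨(v, f.2.1, f.2.2), ?_, by simp [hnm]⟩
    refine List.mem_flatMap.mpr ⟨v.toNat, List.mem_range.mpr (by omega), ?_⟩
    refine List.mem_filterMap.mpr ⟨f, hfl, ?_⟩
    have hcast : ((v.toNat : Nat) : Int) = v := by omega
    rw [hcast, hfo]
    simp

-- the name of a field determines its search, so keys are unique
theorem fields_name_inj (hs : List String) :
    ∀ f ∈ pvFields hs, ∀ f' ∈ pvFields hs, f.2.2 = f'.2.2 → f.1 = f'.1 := by
  intro f hf f' hf'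
  simp only [pvFields, List.mem_cons, List.not_mem_nil, or_false] at hf hf'
  rcases hf with rfl | rfl | rfl | rfl | rfl | rfl | rfl | rfl | rfl <;>
    rcases hf' with rfl | rfl | rfl | rfl | rfl | rfl | rfl | rfl | rfl <;>
    simp

theorem nodup_names_canon (hs : List String) :
    ((pvCanon hs).map (fun t => t.2.2)).Nodup := by
  rw [List.nodup_iff_pairwise_ne]
  rw [List.pairwise_map]
  apply pairwise_flatMap_range (g := fun (k : Nat) => pvGroupOf (pvFields hs) ((k : Nat) : Int))
  · intro k
    apply List.Pairwise.sublist (groupOf_sublist_map (pvFields hs) (k : Int))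
    simp only [pvFields, List.map_cons, List.map_nil]
    simp [List.pairwise_cons]
  · intro j k hjk a ha b hb
    rcases mem_groupOf_exists ha with ⟨f, hfl, hf1, rfl⟩
    rcases mem_groupOf_exists hb with ⟨f', hfl', hf1', rfl⟩
    intro hne
    have := fields_name_inj hs f hfl f' hfl' hne
    rw [hf1, hf1'] at this
    simp only [Option.some.injEq] at this
    omega

-- ---- dict facts for a state whose items are the canonical pairs ----
theorem keys_of_items {hs : List String} {d : PySem.Dict String Int}
    (hit : d.items = pvPairs (pvCanon hs)) :
    d.keys = (pvCanon hs).map (fun t => t.2.2) := by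
  simp only [PySem.Dict.keys, hit, pvPairs, List.map_map]
  rfl

theorem contains_of_items {hs : List String} {d : PySem.Dict String Int}
    (hit : d.items = pvPairs (pvCanon hs)) (nm : String) (o : Option Int)
    (hiff : (∃ f ∈ pvFields hs, f.2.2 = nm ∧ f.1.isSome = true) ↔ o.isSome = true) :
    d.contains nm = o.isSome := by
  rw [Bool.eq_iff_iff, PySem.Dict.contains_iff_mem_keys, keys_of_items hit,
    mem_map_name_canon]
  exact hiff

theorem hiff_date (hs : List String) :
    (∃ f ∈ pvFields hs, f.2.2 = "date" ∧ f.1.isSome = true) ↔ (pvDateO hs).isSome = true := by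
  simp [pvFields]

theorem hiff_desc (hs : List String) :
    (∃ f ∈ pvFields hs, f.2.2 = "description" ∧ f.1.isSome = true) ↔ (pvDesc hs).isSome = true := by
  simp [pvFields]

theorem hiff_amount (hs : List String) :
    (∃ f ∈ pvFields hs, f.2.2 = "amount" ∧ f.1.isSome = true) ↔ (pvAmountO hs).isSome = true := by
  simp [pvFields]

theorem hiff_debit (hs : List String) :
    (∃ f ∈ pvFields hs, f.2.2 = "debit" ∧ f.1.isSome = true) ↔ (pvDebitO hs).isSome = true := by
  simp [pvFields]

theorem hiff_credit (hs : List String) :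
    (∃ f ∈ pvFields hs, f.2.2 = "credit" ∧ f.1.isSome = true) ↔ (pvCreditO hs).isSome = true := by
  simp [pvFields]

theorem hiff_balance (hs : List String) :
    (∃ f ∈ pvFields hs, f.2.2 = "balance" ∧ f.1.isSome = true) ↔ (pvBalanceO hs).isSome = true := by
  simp [pvFields]

theorem hiff_category (hs : List String) :
    (∃ f ∈ pvFields hs, f.2.2 = "category" ∧ f.1.isSome = true) ↔ (pvCategoryO hs).isSome = true := by
  simp [pvFields]

theorem hiff_check (hs : List String) :
    (∃ f ∈ pvFields hs, f.2.2 = "check" ∧ f.1.isSome = true) ↔ (pvCheckO hs).isSome = true := by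
  simp [pvFields]

theorem hiff_memo (hs : List String) :
    (∃ f ∈ pvFields hs, f.2.2 = "memo" ∧ f.1.isSome = true) ↔ (pvMemoO hs).isSome = true := by
  simp [pvFields]

theorem get?_desc_of_items {hs : List String} {d : PySem.Dict String Int}
    (hit : d.items = pvPairs (pvCanon hs)) :
    d.get? "description" = pvDesc hs := by
  have hnd : d.keys.Nodup := by
    rw [keys_of_items hit]; exact nodup_names_canon hs
  cases hdo : pvDesc hs with
  | some m =>
    refine PySem.Dict.get?_of_mem_items d ?_ hnd
    rw [hit]
    exact (mem_pairs_canon hs _ m).mpr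
      ⟨(pvDesc hs, 1, "description"), by simp [pvFields], rfl, by rw [hdo]⟩
  | none =>
    rw [PySem.Dict.get?_eq_none_iff_not_mem_keys, keys_of_items hit, mem_map_name_canon]
    rintro ⟨f, hfl, hnm, hsome⟩
    have := fields_name_inj hs f hfl (pvDesc hs, 1, "description") (by simp [pvFields]) (by simpa using hnm)
    simp only [hdo] at this
    rw [this] at hsome
    cases hsome

-- ---- A's loop body as a chain of guarded inserts ----
def pvBlock (f : String) (c : String → Bool) (n : Int) (h : String)
    (d : PySem.Dict String Int) : PySem.Dict String Int :=
  if (!d.contains f && c h) = true then d.insert f n else d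

def pvDateBlock (n : Int) (h : String) (d : PySem.Dict String Int) : PySem.Dict String Int :=
  if (!d.contains "date" && pvKwAny ["date", "posted", "trans"] h) = true then
    (if (!PySem.Str.isIn "description" h) = true then d.insert "date" n else d) else d

def pvMemoBlock (n : Int) (h : String) (d : PySem.Dict String Int) : PySem.Dict String Int :=
  if (!d.contains "memo" && PySem.Str.isIn "memo" h) = true then
    (if (!(d.get? "description" == some n)) = true then d.insert "memo" n else d) else d

theorem stepA_decomp (d : PySem.Dict String Int) (n : Int) (h : String) :
    pvStepA d (n, h) =
      if (h == "") = true then d else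
      pvMemoBlock n h
        (pvBlock "check" (fun x => PySem.Str.isIn "check" x) n h
          (pvBlock "category" (fun x => PySem.Str.isIn "category" x) n h
            (pvBlock "balance" (fun x => pvKwAny ["balance", "bal", "running"] x) n h
              (pvBlock "credit" (fun x => pvKwAny ["credit", "deposit"] x) n h
                (pvBlock "debit" (fun x => pvKwAny ["debit", "withdrawal", "payment"] x) n h
                  (pvBlock "amount" (fun x => PySem.Str.isIn "amount" x) n h
                    (pvBlock "description"
                      (fun x => pvKwAny ["description", "desc", "memo", "payee", "merchant", "name"] x) n h
                      (pvDateBlock n h d)))))))) := rfl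

theorem pvBlock_items (f : String) (c : String → Bool) (n : Int) (h : String)
    (d : PySem.Dict String Int) :
    (pvBlock f c n h d).items
      = d.items ++ (if (!d.contains f && c h) = true then [(f, n)] else []) := by
  unfold pvBlock
  by_cases hc : (!d.contains f && c h) = true
  · rw [if_pos hc, if_pos hc, PySem.Dict.items_insert_of_not_contains]
    simp only [Bool.and_eq_true, Bool.not_eq_true'] at hc
    exact hc.1
  · rw [if_neg hc, if_neg hc, List.append_nil]

theorem pvDateBlock_items (n : Int) (h : String) (d : PySem.Dict String Int) :
    (pvDateBlock n h d).items
      = d.items ++ (if (!d.contains "date" && (pvKwAny ["date", "posted", "trans"] h && !PySem.Str.isIn "description" h)) = true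
                    then [("date", n)] else []) := by
  unfold pvDateBlock
  cases hcb : d.contains "date" with
  | true => simp [hcb]
  | false =>
    cases hkw : pvKwAny ["date", "posted", "trans"] h with
    | false => simp [hcb, hkw]
    | true =>
      cases hds : PySem.Str.isIn "description" h with
      | false => simp [hcb, hkw, hds, PySem.Dict.items_insert_of_not_contains d n hcb]
      | true => simp [hcb, hkw, hds]

theorem pvMemoBlock_items (n : Int) (h : String) (d : PySem.Dict String Int) :
    (pvMemoBlock n h d).items
      = d.items ++ (if (!d.contains "memo" && (PySem.Str.isIn "memo" h && !(d.get? "description" == some n))) = true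
                    then [("memo", n)] else []) := by
  unfold pvMemoBlock
  cases hcb : d.contains "memo" with
  | true => simp [hcb]
  | false =>
    cases hm : PySem.Str.isIn "memo" h with
    | false => simp [hcb, hm]
    | true =>
      cases hg : d.get? "description" == some n with
      | true => simp [hcb, hm, hg]
      | false => simp [hcb, hm, hg, PySem.Dict.items_insert_of_not_contains d n hcb]



-- ---- the found-index of the extended list hits the new column iff A's guard fires ----
theorem cond_iff_const (q : String → Bool) (hs : List String) (h : String) :
    (pvFirst (fun _ x => q x) 0 (hs ++ [h]) = some (hs.length : Int))
      ↔ (!(pvFirst (fun _ x => q x) 0 hs).isSome && (!(h == "") && q h)) = true := by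
  rw [pvFirst_const_append, or_tail_eq_some_iff]
  intro m hm
  have := pvFirst_some_bound hm
  omega

theorem cond_iff_memo (hs : List String) (h : String) :
    (pvMemoO (hs ++ [h]) = some (hs.length : Int))
      ↔ (!(pvMemoO hs).isSome
          && (!(h == "") && (PySem.Str.isIn "memo" h && !(some (hs.length : Int) == pvDesc (hs ++ [h]))))) = true := by
  rw [pvMemoO_append, or_tail_eq_some_iff]
  intro m hm
  have := pvFirst_some_bound (p := fun i x => PySem.Str.isIn "memo" x && !(some i == pvDesc hs)) hm
  omega

theorem pvBlock_contains (f : String) (c : String → Bool) (n : Int) (h : String)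
    (d : PySem.Dict String Int) (g : String) (hne : (g == f) = false) :
    (pvBlock f c n h d).contains g = d.contains g := by
  unfold pvBlock
  split
  · simp [PySem.Dict.contains_insert, hne]
  · rfl

theorem pvDateBlock_contains (n : Int) (h : String) (d : PySem.Dict String Int)
    (g : String) (hne : (g == "date") = false) :
    (pvDateBlock n h d).contains g = d.contains g := by
  unfold pvDateBlock
  split
  · split
    · simp [PySem.Dict.contains_insert, hne]
    · rfl
  · rfl

theorem pvBlock_get? (f : String) (c : String → Bool) (n : Int) (h : String)
    (d : PySem.Dict String Int) (g : String) (hne : g ≠ f) :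
    (pvBlock f c n h d).get? g = d.get? g := by
  unfold pvBlock
  split
  · simp [PySem.Dict.get?_insert, hne]
  · rfl

theorem pvDateBlock_get? (n : Int) (h : String) (d : PySem.Dict String Int)
    (g : String) (hne : g ≠ "date") :
    (pvDateBlock n h d).get? g = d.get? g := by
  unfold pvDateBlock
  split
  · split
    · simp [PySem.Dict.get?_insert, hne]
    · rfl
  · rfl

-- after the description block has run on header h, the stored description index is the
-- one for the extended list
theorem get?_desc_block (hs : List String) (h : String) (d : PySem.Dict String Int)
    (hh : (h == "") = false)
    (hgd : d.get? "description" = pvDesc hs)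
    (hcdesc : d.contains "description" = (pvDesc hs).isSome) :
    (pvBlock "description" (fun x => pvKwAny ["description", "desc", "memo", "payee", "merchant", "name"] x)
        (hs.length : Int) h d).get? "description" = pvDesc (hs ++ [h]) := by
  unfold pvBlock
  rw [pvDesc_append]
  by_cases hc : (!d.contains "description" && pvKwAny ["description", "desc", "memo", "payee", "merchant", "name"] h) = true
  · rw [if_pos hc]
    rw [PySem.Dict.get?_insert]
    obtain ⟨hC, hK⟩ := (Bool.and_eq_true _ _).mp hc
    have hnone : pvDesc hs = none := by
      rw [Bool.not_eq_true'] at hC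
      rw [hcdesc] at hC
      exact Option.not_isSome_iff_eq_none.mp (by simp [hC])
    rw [hnone]
    simp [hh, hK, Option.or]
  · rw [if_neg hc]
    rw [hgd]
    cases hdo : pvDesc hs with
    | some m => simp [Option.or]
    | none =>
      have hK : pvKwAny ["description", "desc", "memo", "payee", "merchant", "name"] h = false := by
        rw [hcdesc, hdo] at hc
        simpa using hc
      simp [Option.or, hK]

-- ---- the column group as an explicit list of guarded singletons ----
theorem groupOf_cons (f : Option Int × Int × String) (l : List (Option Int × Int × String)) (n : Int) :
    pvGroupOf (f :: l) n
      = (if f.1 = some n then [(n, f.2.1, f.2.2)] else []) ++ pvGroupOf l n := by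
  unfold pvGroupOf
  rw [List.filterMap_cons]
  by_cases hf : f.1 = some n <;> simp [hf]

theorem groupOf_nil (n : Int) : pvGroupOf [] n = [] := rfl

-- ---- conditions for hitting the new column, per field ----
theorem cond_date (hs : List String) (h : String) :
    (pvDateO (hs ++ [h]) = some (hs.length : Int))
      ↔ (!(pvDateO hs).isSome && (!(h == "") && (pvKwAny ["date", "posted", "trans"] h && !PySem.Str.isIn "description" h))) = true :=
  cond_iff_const _ hs h

theorem cond_desc (hs : List String) (h : String) :
    (pvDesc (hs ++ [h]) = some (hs.length : Int))
      ↔ (!(pvDesc hs).isSome && (!(h == "") && pvKwAny ["description", "desc", "memo", "payee", "merchant", "name"] h)) = true :=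
  cond_iff_const _ hs h

theorem cond_amount (hs : List String) (h : String) :
    (pvAmountO (hs ++ [h]) = some (hs.length : Int))
      ↔ (!(pvAmountO hs).isSome && (!(h == "") && PySem.Str.isIn "amount" h)) = true :=
  cond_iff_const _ hs h

theorem cond_debit (hs : List String) (h : String) :
    (pvDebitO (hs ++ [h]) = some (hs.length : Int))
      ↔ (!(pvDebitO hs).isSome && (!(h == "") && pvKwAny ["debit", "withdrawal", "payment"] h)) = true :=
  cond_iff_const _ hs h

theorem cond_credit (hs : List String) (h : String) :
    (pvCreditO (hs ++ [h]) = some (hs.length : Int))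
      ↔ (!(pvCreditO hs).isSome && (!(h == "") && pvKwAny ["credit", "deposit"] h)) = true :=
  cond_iff_const _ hs h

theorem cond_balance (hs : List String) (h : String) :
    (pvBalanceO (hs ++ [h]) = some (hs.length : Int))
      ↔ (!(pvBalanceO hs).isSome && (!(h == "") && pvKwAny ["balance", "bal", "running"] h)) = true :=
  cond_iff_const _ hs h

theorem cond_category (hs : List String) (h : String) :
    (pvCategoryO (hs ++ [h]) = some (hs.length : Int))
      ↔ (!(pvCategoryO hs).isSome && (!(h == "") && PySem.Str.isIn "category" h)) = true :=
  cond_iff_const _ hs h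

theorem cond_check (hs : List String) (h : String) :
    (pvCheckO (hs ++ [h]) = some (hs.length : Int))
      ↔ (!(pvCheckO hs).isSome && (!(h == "") && PySem.Str.isIn "check" h)) = true :=
  cond_iff_const _ hs h

-- ---- one loop iteration appends exactly the new column's group ----
theorem stepA_items (hs : List String) (h : String) (d : PySem.Dict String Int)
    (hit : d.items = pvPairs (pvCanon hs)) :
    (pvStepA d ((hs.length : Int), h)).items
      = d.items ++ pvPairs (pvGroupOf (pvFields (hs ++ [h])) (hs.length : Int)) := by
  have hc1 := contains_of_items hit "date" _ (hiff_date hs)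
  have hc2 := contains_of_items hit "description" _ (hiff_desc hs)
  have hc3 := contains_of_items hit "amount" _ (hiff_amount hs)
  have hc4 := contains_of_items hit "debit" _ (hiff_debit hs)
  have hc5 := contains_of_items hit "credit" _ (hiff_credit hs)
  have hc6 := contains_of_items hit "balance" _ (hiff_balance hs)
  have hc7 := contains_of_items hit "category" _ (hiff_category hs)
  have hc8 := contains_of_items hit "check" _ (hiff_check hs)
  have hc9 := contains_of_items hit "memo" _ (hiff_memo hs)
  have hgd := get?_desc_of_items hit
  have hgroup : pvPairs (pvGroupOf (pvFields (hs ++ [h])) (hs.length : Int))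
      = (if (!(pvDateO hs).isSome && (!(h == "") && (pvKwAny ["date", "posted", "trans"] h && !PySem.Str.isIn "description" h))) = true then [("date", (hs.length : Int))] else [])
        ++ (if (!(pvDesc hs).isSome && (!(h == "") && pvKwAny ["description", "desc", "memo", "payee", "merchant", "name"] h)) = true then [("description", (hs.length : Int))] else [])
        ++ (if (!(pvAmountO hs).isSome && (!(h == "") && PySem.Str.isIn "amount" h)) = true then [("amount", (hs.length : Int))] else [])
        ++ (if (!(pvDebitO hs).isSome && (!(h == "") && pvKwAny ["debit", "withdrawal", "payment"] h)) = true then [("debit", (hs.length : Int))] else [])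
        ++ (if (!(pvCreditO hs).isSome && (!(h == "") && pvKwAny ["credit", "deposit"] h)) = true then [("credit", (hs.length : Int))] else [])
        ++ (if (!(pvBalanceO hs).isSome && (!(h == "") && pvKwAny ["balance", "bal", "running"] h)) = true then [("balance", (hs.length : Int))] else [])
        ++ (if (!(pvCategoryO hs).isSome && (!(h == "") && PySem.Str.isIn "category" h)) = true then [("category", (hs.length : Int))] else [])
        ++ (if (!(pvCheckO hs).isSome && (!(h == "") && PySem.Str.isIn "check" h)) = true then [("check", (hs.length : Int))] else [])
        ++ (if (!(pvMemoO hs).isSome && (!(h == "") && (PySem.Str.isIn "memo" h && !(some (hs.length : Int) == pvDesc (hs ++ [h]))))) = true then [("memo", (hs.length : Int))] else []) := by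
    simp only [pvFields, groupOf_cons, groupOf_nil, List.append_nil, pvPairs, List.map_append,
      apply_ite (List.map (fun t : Int × Int × String => (t.2.2, t.1))), List.map_cons, List.map_nil]
    simp only [cond_date hs h, cond_desc hs h, cond_amount hs h, cond_debit hs h,
      cond_credit hs h, cond_balance hs h, cond_category hs h, cond_check hs h,
      cond_iff_memo hs h]
    simp only [List.append_assoc]
  rw [stepA_decomp]
  by_cases hh : (h == "") = true
  · rw [if_pos hh, hgroup]
    simp [hh]
  · replace hh : (h == "") = false := by simpa using hh
    rw [if_neg (by simp [hh]), hgroup]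
    rw [pvMemoBlock_items]
    rw [pvBlock_items "check", pvBlock_items "category", pvBlock_items "balance",
      pvBlock_items "credit", pvBlock_items "debit", pvBlock_items "amount",
      pvBlock_items "description", pvDateBlock_items]
    have hgd1 : (pvDateBlock (hs.length : Int) h d).get? "description" = pvDesc hs := by
      rw [pvDateBlock_get? _ _ _ _ (by decide)]; exact hgd
    have hc2' : (pvDateBlock (hs.length : Int) h d).contains "description" = (pvDesc hs).isSome := by
      rw [pvDateBlock_contains _ _ _ _ (by decide)]; exact hc2
    have hdesc2 := get?_desc_block hs h _ hh hgd1 hc2'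
    simp only [pvBlock_contains, pvDateBlock_contains, pvBlock_get?, hdesc2,
      hc1, hc2, hc3, hc4, hc5, hc6, hc7, hc8, hc9,
      String.reduceBEq, ne_eq, String.reduceEq, not_false_iff, hh, Bool.not_false, Bool.true_and,
      List.append_assoc, Bool.beq_comm]

-- columns below the new one are unaffected by appending a header
theorem groupOf_append_lt (hs : List String) (h : String) (k : Nat) (hk : k < hs.length) :
    pvGroupOf (pvFields (hs ++ [h])) ((k : Nat) : Int) = pvGroupOf (pvFields hs) ((k : Nat) : Int) := by
  have hkn : ((k : Nat) : Int) ≠ (hs.length : Int) := by omega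
  have e1 : (pvDateO (hs ++ [h]) = some ((k : Nat) : Int)) ↔ (pvDateO hs = some ((k : Nat) : Int)) := by
    rw [pvDateO_append]; exact or_tail_eq_some_lt _ _ _ _ hkn
  have e2 : (pvDesc (hs ++ [h]) = some ((k : Nat) : Int)) ↔ (pvDesc hs = some ((k : Nat) : Int)) := by
    rw [pvDesc_append]; exact or_tail_eq_some_lt _ _ _ _ hkn
  have e3 : (pvAmountO (hs ++ [h]) = some ((k : Nat) : Int)) ↔ (pvAmountO hs = some ((k : Nat) : Int)) := by
    rw [pvAmountO_append]; exact or_tail_eq_some_lt _ _ _ _ hkn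
  have e4 : (pvDebitO (hs ++ [h]) = some ((k : Nat) : Int)) ↔ (pvDebitO hs = some ((k : Nat) : Int)) := by
    rw [pvDebitO_append]; exact or_tail_eq_some_lt _ _ _ _ hkn
  have e5 : (pvCreditO (hs ++ [h]) = some ((k : Nat) : Int)) ↔ (pvCreditO hs = some ((k : Nat) : Int)) := by
    rw [pvCreditO_append]; exact or_tail_eq_some_lt _ _ _ _ hkn
  have e6 : (pvBalanceO (hs ++ [h]) = some ((k : Nat) : Int)) ↔ (pvBalanceO hs = some ((k : Nat) : Int)) := by
    rw [pvBalanceO_append]; exact or_tail_eq_some_lt _ _ _ _ hkn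
  have e7 : (pvCategoryO (hs ++ [h]) = some ((k : Nat) : Int)) ↔ (pvCategoryO hs = some ((k : Nat) : Int)) := by
    rw [pvCategoryO_append]; exact or_tail_eq_some_lt _ _ _ _ hkn
  have e8 : (pvCheckO (hs ++ [h]) = some ((k : Nat) : Int)) ↔ (pvCheckO hs = some ((k : Nat) : Int)) := by
    rw [pvCheckO_append]; exact or_tail_eq_some_lt _ _ _ _ hkn
  have e9 : (pvMemoO (hs ++ [h]) = some ((k : Nat) : Int)) ↔ (pvMemoO hs = some ((k : Nat) : Int)) := by
    rw [pvMemoO_append]; exact or_tail_eq_some_lt _ _ _ _ hkn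
  simp only [pvFields, groupOf_cons, groupOf_nil, e1, e2, e3, e4, e5, e6, e7, e8, e9]

theorem canon_append (hs : List String) (h : String) :
    pvCanon (hs ++ [h]) = pvCanon hs ++ pvGroupOf (pvFields (hs ++ [h])) (hs.length : Int) := by
  unfold pvCanon
  have hlen : (hs ++ [h]).length = hs.length + 1 := by simp
  rw [hlen, List.range_succ, List.flatMap_append]
  simp only [List.flatMap_cons, List.flatMap_nil, List.append_nil]
  congr 1
  simp only [List.flatMap_def]
  refine congrArg List.flatten (List.map_congr_left ?_)
  intro k hk
  exact groupOf_append_lt hs h k (List.mem_range.mp hk)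

-- ---- the loop invariant: A's dict lists the canonical pairs ----
theorem loop_invariant (hs : List String) :
    ((PySem.List.enumerate hs 0).foldl pvStepA PySem.Dict.empty).items = pvPairs (pvCanon hs) := by
  induction hs using List.reverseRecOn with
  | nil => simp [PySem.List.enumerate, pvCanon, pvPairs, PySem.Dict.empty]
  | append_singleton hs h ih =>
    rw [PySem.List.enumerate_append, List.foldl_append]
    simp only [PySem.List.enumerate_cons, PySem.List.enumerate_nil, List.foldl_cons,
      List.foldl_nil, zero_add]
    rw [stepA_items hs h _ ih, ih, canon_append hs h]
    simp [pvPairs]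

theorem filterMap_cons_toList {α β : Type} (f : α → Option β) (x : α) (xs : List α) :
    List.filterMap f (x :: xs) = (f x).toList ++ List.filterMap f xs := by
  rw [List.filterMap_cons]
  cases f x <;> simp

theorem toList_map_opt {α β : Type} (f : α → β) (o : Option α) :
    (Option.map f o).toList = o.toList.map f := by
  cases o <;> rfl

-- B, written with the named per-field searches
theorem alt_eq (headers : List String) :
    detect_column_mapping_py_alt headers =
      (if ((pvDateO headers).isNone || (pvDesc headers).isNone) = true then none
       else if ((pvAmountO headers).isNone && ((pvDebitO headers).isNone || (pvCreditO headers).isNone)) = true then none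
       else some (PySem.List.sorted (pvPairs (pvRankedOf (pvFields headers))) (fun kv => kv.2))) := by
  unfold detect_column_mapping_py_alt pvRankedOf pvFields pvPairs pvDateO pvDesc pvAmountO
    pvDebitO pvCreditO pvBalanceO pvCategoryO pvCheckO pvMemoO
  simp [filterMap_cons_toList, List.map_append, toList_map_opt, List.map_map, Function.comp_def, pvDesc]

-- ===== VERDICT (by name: the statement is the Claim_ definition above) =====
theorem detect_column_mapping_py_spec : Claim_equal_detect_column_mapping_py := by
  intro headers _
  unfold Spec_detect_column_mapping_py
  rw [alt_eq]
  unfold detect_column_mapping_py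
  have hit := loop_invariant headers
  have hc1 := contains_of_items hit "date" _ (hiff_date headers)
  have hc2 := contains_of_items hit "description" _ (hiff_desc headers)
  have hc3 := contains_of_items hit "amount" _ (hiff_amount headers)
  have hc4 := contains_of_items hit "debit" _ (hiff_debit headers)
  have hc5 := contains_of_items hit "credit" _ (hiff_credit headers)
  rw [sorted_pairs]
  simp only [hc1, hc2, hc3, hc4, hc5, hit, Option.not_isSome]
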